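-- pv_equiv track=rewrite | github.com/eirikora/NVE_Smartdok | nve_data/resolve_vassdrag.py | find_exact_match
-- ===== SOURCE A (Python) =====
-- from typing import Optional
--
-- def find_exact_match(search_name: str, regine_index: list[dict]) -> Optional[dict]:
--     """
--     Søker etter eksakt match i INDEX_regine.json basert på 'navn' eller 'navn_normalisert' (case-insensitive).
--     Prioriterer match på 'navn' feltet først, deretter 'navn_normalisert'.
--     Returnerer første match hvis funnet, ellers None.
--     """
--     search_lower = search_name.lower()
--
--     # Første pass: søk etter match på 'navn' feltet (originalnavn i indeksen)
--     for entry in regine_index: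
--         if entry.get("navn", "").lower() == search_lower:
--             return entry
--
--     # Andre pass: søk etter match på 'navn_normalisert' feltet
--     for entry in regine_index:
--         if entry.get("navn_normalisert", "").lower() == search_lower:
--             return entry
--
--     return None
-- ===== SOURCE B (Python) =====
-- from typing import Optional
--
-- def find_exact_match(search_name: str, regine_index: list[dict]) -> Optional[dict]:
--     """Single pass: return immediately on a 'navn' match; remember the first
--     'navn_normalisert' match as a fallback and return it after the loop."""
--     search_lower = search_name.lower()
--     fallback = None
--     for entry in regine_index:
--         if entry.get("navn", "").lower() == search_lower:
--             return entry
--         if fallback is None and entry.get("navn_normalisert", "").lower() == search_lower: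
--             fallback = entry
--     return fallback
-- ===== Notes on version B (the rewrite author's own statement) =====
-- stated objective: alternative
-- what changed: Replaced A's two sequential scans over the list with a single pass that returns immediately on a 'navn' match and keeps the first 'navn_normalisert' match in a fallback variable returned after the loop.
import Mathlib
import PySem

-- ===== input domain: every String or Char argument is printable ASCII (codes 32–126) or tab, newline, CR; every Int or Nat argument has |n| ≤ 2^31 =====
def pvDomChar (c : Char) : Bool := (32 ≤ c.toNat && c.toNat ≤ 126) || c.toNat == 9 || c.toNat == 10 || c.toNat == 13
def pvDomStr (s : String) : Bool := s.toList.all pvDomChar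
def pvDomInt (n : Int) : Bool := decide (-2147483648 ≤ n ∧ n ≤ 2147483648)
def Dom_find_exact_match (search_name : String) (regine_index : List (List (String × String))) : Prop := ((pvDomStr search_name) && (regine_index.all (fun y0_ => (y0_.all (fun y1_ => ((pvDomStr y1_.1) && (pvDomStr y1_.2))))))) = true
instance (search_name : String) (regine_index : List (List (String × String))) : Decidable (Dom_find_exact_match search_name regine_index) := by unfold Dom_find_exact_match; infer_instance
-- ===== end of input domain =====

-- B replaces A's two sequential scans with one pass holding a first-normalised-match fallback (alternative decomposition, same cost).
-- ===== PORT A =====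
-- first pass of A: scan for a case-insensitive match on the "navn" field
def pvScanNavn (search_lower : String) : List (List (String × String)) → Option (List (String × String))
  | [] => none
  | entry :: rest =>
    if PySem.Str.lower ((PySem.Dict.mk entry).getD "navn" "") == search_lower then some entry
    else pvScanNavn search_lower rest

-- second pass of A: scan for a case-insensitive match on the "navn_normalisert" field
def pvScanNorm (search_lower : String) : List (List (String × String)) → Option (List (String × String))
  | [] => none
  | entry :: rest =>
    if PySem.Str.lower ((PySem.Dict.mk entry).getD "navn_normalisert" "") == search_lower then some entry
    else pvScanNorm search_lower rest

def find_exact_match (search_name : String) (regine_index : List (List (String × String))) : Option (List (String × String)) :=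
  let search_lower := PySem.Str.lower search_name
  match pvScanNavn search_lower regine_index with
  | some entry => some entry
  | none =>
    match pvScanNorm search_lower regine_index with
    | some entry => some entry
    | none => none

-- ===== PORT B =====
-- single pass with a fallback accumulator (the first "navn_normalisert" match seen so far)
def pvOnePass (search_lower : String) : List (List (String × String)) → Option (List (String × String)) → Option (List (String × String))
  | [], fallback => fallback
  | entry :: rest, fallback =>
    if PySem.Str.lower ((PySem.Dict.mk entry).getD "navn" "") == search_lower then some entry
    else pvOnePass search_lower rest
      (if fallback.isNone && (PySem.Str.lower ((PySem.Dict.mk entry).getD "navn_normalisert" "") == search_lower)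
       then some entry else fallback)

def find_exact_match_alt (search_name : String) (regine_index : List (List (String × String))) : Option (List (String × String)) :=
  pvOnePass (PySem.Str.lower search_name) regine_index none

-- ===== PRECONDITION & SPEC =====
def Spec_find_exact_match (search_name : String) (regine_index : List (List (String × String))) (out : Option (List (String × String))) : Prop := out = find_exact_match_alt search_name regine_index
instance (search_name : String) (regine_index : List (List (String × String))) (out : Option (List (String × String))) : Decidable (Spec_find_exact_match search_name regine_index out) := by unfold Spec_find_exact_match; infer_instance

-- ===== CLAIM =====
def Claim_equal_find_exact_match : Prop := ∀ (search_name : String) (regine_index : List (List (String × String))), Dom_find_exact_match search_name regine_index → Spec_find_exact_match search_name regine_index (find_exact_match search_name regine_index)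

-- ===== LEMMAS AND PROOFS =====
-- Invariant: one pass with fallback fb equals scanNavn, else fb, else scanNorm.
theorem pvOnePass_eq (sl : String) (l : List (List (String × String)))
    (fb : Option (List (String × String))) :
    pvOnePass sl l fb = (pvScanNavn sl l).or (fb.or (pvScanNorm sl l)) := by
  induction l generalizing fb with
  | nil => cases fb <;> simp [pvOnePass, pvScanNavn, pvScanNorm]
  | cons entry rest ih =>
    simp only [pvOnePass, pvScanNavn, pvScanNorm]
    by_cases h1 : (PySem.Str.lower ((PySem.Dict.mk entry).getD "navn" "") == sl) = true
    · simp [h1]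
    · simp only [h1, if_false, Bool.false_eq_true, ih]
      cases fb with
      | some f => simp
      | none =>
        by_cases h2 : (PySem.Str.lower ((PySem.Dict.mk entry).getD "navn_normalisert" "") == sl) = true
        · simp [h2]
        · simp [h2]

-- ===== VERDICT =====
theorem find_exact_match_spec : Claim_equal_find_exact_match := by
  intro search_name regine_index _
  unfold Spec_find_exact_match find_exact_match find_exact_match_alt
  rw [pvOnePass_eq]
  cases hA : pvScanNavn (PySem.Str.lower search_name) regine_index with
  | some e => simp [hA]
  | none =>
    cases hB : pvScanNorm (PySem.Str.lower search_name) regine_index <;> simp [hA, hB]
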